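-- pv_equiv track=rewrite | github.com/paulchrisluke/quill-auto-blogger | services/utils.py | validate_story_id
-- ===== SOURCE A (Python) =====
-- def validate_story_id(story_id: str) -> bool:
--     """
--     Validate story_id to prevent path traversal and CLI misuse.
--
--     Args:
--         story_id: The story ID to validate
--
--     Returns:
--         True if valid, False otherwise
--     """
--     if not story_id or not isinstance(story_id, str):
--         return False
--
--     # Reject IDs that start with hyphens to prevent CLI option injection
--     if story_id.startswith('-'):
--         return False
--
--     # Enforce ASCII-only characters
--     if not story_id.isascii():
--         return False
--
--     # Restrict to safe charset: alphanumeric, hyphens, underscores only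
--     if not story_id.replace('-', '').replace('_', '').isalnum():
--         return False
--
--     # Limit length to prevent abuse
--     if len(story_id) > 50:
--         return False
--
--     # Prevent common path traversal patterns
--     dangerous_patterns = ['..', '/', '\\', '~']
--     if any(pattern in story_id for pattern in dangerous_patterns):
--         return False
--
--     return True
-- ===== SOURCE B (Python) =====
-- def validate_story_id(story_id: str) -> bool:
--     """Single character-scan validation: one pass tracking whether a real
--     alphanumeric was seen, instead of A's cascade of whole-string built-ins."""
--     if not story_id or not isinstance(story_id, str):
--         return False
--     if len(story_id) > 50 or story_id[0] == '-':
--         return False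
--     has_alnum = False
--     for ch in story_id:
--         if ('0' <= ch <= '9') or ('A' <= ch <= 'Z') or ('a' <= ch <= 'z'):
--             has_alnum = True
--         elif ch not in '-_':
--             return False
--     return has_alnum
-- ===== Notes on version B (the rewrite author's own statement) =====
-- stated objective: simpler
-- what changed: Replaced A's cascade of whole-string built-ins (isascii, double replace + isalnum, substring scans for dangerous patterns) by a single left-to-right character scan carrying one has-alnum flag.
import Mathlib
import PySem

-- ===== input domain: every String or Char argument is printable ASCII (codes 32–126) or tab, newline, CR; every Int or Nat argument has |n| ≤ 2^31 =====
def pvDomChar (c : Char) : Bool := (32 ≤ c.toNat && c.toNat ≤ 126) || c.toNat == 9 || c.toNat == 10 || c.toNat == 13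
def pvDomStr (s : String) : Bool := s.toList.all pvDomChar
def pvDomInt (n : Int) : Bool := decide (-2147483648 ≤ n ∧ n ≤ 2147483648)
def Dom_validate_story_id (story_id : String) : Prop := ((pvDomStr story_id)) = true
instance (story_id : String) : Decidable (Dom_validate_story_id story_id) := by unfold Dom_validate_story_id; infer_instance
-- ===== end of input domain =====

-- B replaces A's cascade of whole-string built-ins (isascii / double replace + isalnum /
-- substring scans) by a single character scan tracking one flag; objective: simpler, one pass.

-- ===== PORT A =====
-- str.isascii(): every code point < 128 (exact; PySem has no isascii primitive)
def pvIsAscii (s : List Char) : Bool := s.all (fun c => decide (c.toNat < 128))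

def pvDangerousPatterns : List (List Char) := [['.', '.'], ['/'], ['\\'], ['~']]

def validate_story_id (story_id : String) : Bool :=
  let s := story_id.toList
  if s.isEmpty then false
  else if PySem.Chars.startswith s ['-'] then false
  else if !(pvIsAscii s) then false
  else if !(PySem.Chars.strIsalnum (PySem.Chars.replace (PySem.Chars.replace s ['-'] []) ['_'] [])) then false
  else if decide (50 < s.length) then false
  else if pvDangerousPatterns.any (fun p => PySem.Chars.isIn p s) then false
  else true

-- ===== PORT B =====
def pvAlnumAscii (c : Char) : Bool :=
  (decide ('0' ≤ c) && decide (c ≤ '9')) || (decide ('A' ≤ c) && decide (c ≤ 'Z')) ||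
    (decide ('a' ≤ c) && decide (c ≤ 'z'))

def pvScan : List Char → Bool → Bool
  | [], hasAlnum => hasAlnum
  | c :: rest, hasAlnum =>
    if pvAlnumAscii c then pvScan rest true
    else if c == '-' || c == '_' then pvScan rest hasAlnum
    else false

def validate_story_id_alt (story_id : String) : Bool :=
  match story_id.toList with
  | [] => false
  | c :: rest =>
    if decide (50 < (c :: rest).length) || c == '-' then false
    else pvScan (c :: rest) false

-- ===== PRECONDITION & SPEC =====
def Spec_validate_story_id (story_id : String) (out : Bool) : Prop := out = validate_story_id_alt story_id
instance (story_id : String) (out : Bool) : Decidable (Spec_validate_story_id story_id out) := by unfold Spec_validate_story_id; infer_instance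

-- ===== CLAIM (what is proved, stated in full; the proofs are below) =====
def Claim_equal_validate_story_id : Prop := ∀ (story_id : String), Dom_validate_story_id story_id → Spec_validate_story_id story_id (validate_story_id story_id)

-- ===== LEMMAS AND PROOFS =====
def pvSafe (c : Char) : Bool := pvAlnumAscii c || c == '-' || c == '_'

theorem pvScan_eq (l : List Char) (h : Bool) :
    pvScan l h = (l.all pvSafe && (h || l.any pvAlnumAscii)) := by
  induction l generalizing h with
  | nil => simp [pvScan]
  | cons c rest ih =>
    simp only [pvScan]
    by_cases hca : pvAlnumAscii c = true
    · simp [hca, ih, pvSafe]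
    · by_cases hd : (c == '-' || c == '_') = true
      · simp only [Bool.not_eq_true] at hca
        simp [hca, hd, ih, pvSafe]
      · simp only [Bool.not_eq_true] at hca
        simp only [Bool.or_eq_true, not_or] at hd
        simp [pvSafe, hca, hd]

theorem pv_replace_go (d : Char) (fuel : Nat) :
    ∀ (l acc : List Char), l.length ≤ fuel →
    PySem.Chars.replace.go [d] [] fuel l acc = acc.reverse ++ l.filter (fun c => !(c == d)) := by
  induction fuel with
  | zero =>
    intro l acc hl
    have : l = [] := List.eq_nil_of_length_eq_zero (Nat.le_zero.mp hl)
    subst this; simp [PySem.Chars.replace.go]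
  | succ n ih =>
    intro l acc hl
    cases l with
    | nil => simp [PySem.Chars.replace.go]
    | cons c t =>
      simp only [PySem.Chars.replace.go]
      by_cases hc : c = d
      · subst hc
        have hpre : List.isPrefixOf [c] (c :: t) = true := by simp [List.isPrefixOf]
        simp only [hpre, if_true, List.length_cons, List.length_nil,
          List.drop_succ_cons, List.drop_zero, List.reverse_nil, List.nil_append] at *
        rw [ih t acc (by omega)]
        simp
      · have hpre : List.isPrefixOf [d] (c :: t) = false := by
          simp [List.isPrefixOf]
          exact fun h => absurd h.symm hc
        simp only [hpre, Bool.false_eq_true, if_false, List.length_cons] at *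
        rw [ih t (c :: acc) (by omega)]
        simp [hc]

theorem pv_replace_filter (s : List Char) (d : Char) :
    PySem.Chars.replace s [d] [] = s.filter (fun c => !(c == d)) := by
  simp only [PySem.Chars.replace, List.isEmpty_cons, Bool.false_eq_true, if_false]
  simpa using pv_replace_go d s.length s [] (le_refl _)

theorem pv_isalnum_eq : PySem.Chars.isalnum = pvAlnumAscii := by
  funext c
  simp only [PySem.Chars.isalnum, PySem.Chars.isalpha, PySem.Chars.isdigit,
    PySem.Chars.isupper, PySem.Chars.islower, pvAlnumAscii]
  cases hd : (decide ('0' ≤ c) && decide (c ≤ '9')) <;>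
    cases hu : (decide ('A' ≤ c) && decide (c ≤ 'Z')) <;>
      cases hl : (decide ('a' ≤ c) && decide (c ≤ 'z')) <;> rfl

theorem pvSafe_ascii {c : Char} (h : pvSafe c = true) : c.toNat < 128 := by
  simp only [pvSafe, pvAlnumAscii, Bool.or_eq_true, Bool.and_eq_true, decide_eq_true_eq,
    beq_iff_eq] at h
  have hle : c ≤ 'z' ∨ c = '-' ∨ c = '_' := by
    rcases h with (((⟨_, h⟩ | ⟨_, h⟩) | ⟨_, h⟩) | h) | h
    · exact Or.inl (le_trans h (by decide))
    · exact Or.inl (le_trans h (by decide))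
    · exact Or.inl h
    · exact Or.inr (Or.inl h)
    · exact Or.inr (Or.inr h)
  rcases hle with h | h | h
  · have h3 : c.val.toNat ≤ ('z').val.toNat := UInt32.le_iff_toNat_le.mp (Char.le_def.mp h)
    have h4 : ('z').val.toNat = 122 := by decide
    have h5 : c.toNat = c.val.toNat := rfl
    omega
  · subst h; decide
  · subst h; decide

-- A's charset test equals: the -/_-stripped list is nonempty and all ASCII-alphanumeric
theorem pv_charset_eq (s : List Char) :
    PySem.Chars.strIsalnum (PySem.Chars.replace (PySem.Chars.replace s ['-'] []) ['_'] [])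
      = (!(s.filter (fun c => !(c == '-') && !(c == '_'))).isEmpty &&
         (s.filter (fun c => !(c == '-') && !(c == '_'))).all pvAlnumAscii) := by
  rw [pv_replace_filter, pv_replace_filter, List.filter_filter]
  rw [show (fun a => !(a == '_') && !(a == '-')) = (fun c : Char => !(c == '-') && !(c == '_'))
      from funext fun c => Bool.and_comm ..]
  simp only [PySem.Chars.strIsalnum, pv_isalnum_eq]

theorem validate_story_id_spec : Claim_equal_validate_story_id := by
  intro story_id _
  unfold Spec_validate_story_id
  simp only [validate_story_id, validate_story_id_alt]
  generalize story_id.toList = cs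
  cases cs with
  | nil => rfl
  | cons c rest =>
    by_cases hc : c = '-'
    · subst hc
      change _ = if (decide (50 < ('-' :: rest).length) || '-' == '-') = true then false
          else pvScan ('-' :: rest) false
      simp [PySem.Chars.startswith, List.isPrefixOf]
    · by_cases hlen : 50 < (c :: rest).length
      · change _ = if (decide (50 < (c :: rest).length) || c == '-') = true then false
            else pvScan (c :: rest) false
        have hg : (decide (50 < (c :: rest).length) || c == '-') = true := by
          simp only [Bool.or_eq_true, decide_eq_true_eq]; exact Or.inl hlen
        rw [hg, if_pos rfl]
        split_ifs <;> simp_all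
      · change _ = if (decide (50 < (c :: rest).length) || c == '-') = true then false
            else pvScan (c :: rest) false
        have hg : (decide (50 < (c :: rest).length) || c == '-') = false := by
          simp only [List.length_cons] at hlen
          simp [hc]; omega
        rw [hg]
        simp only [List.length_cons] at hlen
        simp only [Bool.false_eq_true, if_false, pvScan_eq, Bool.false_or]
        have hsw : PySem.Chars.startswith (c :: rest) ['-'] = false := by
          simp [PySem.Chars.startswith, List.isPrefixOf]
          exact fun h => absurd h.symm hc
        rw [pv_charset_eq]
        simp only [hsw, Bool.false_eq_true, if_false, List.isEmpty_cons]
        set flt := (c :: rest).filter (fun x => !(x == '-') && !(x == '_')) with hflt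
        by_cases hascii : pvIsAscii (c :: rest) = true
        · by_cases hchar : (!flt.isEmpty && flt.all pvAlnumAscii) = true
          · -- charset passes: no dangerous pattern possible, B is true
            have hall : (c :: rest).all pvSafe = true := by
              simp only [Bool.and_eq_true, Bool.not_eq_eq_eq_not, Bool.not_true,
                List.isEmpty_eq_false_iff] at hchar
              rw [List.all_eq_true]; intro x hx
              by_cases hd : (!(x == '-') && !(x == '_')) = true
              · have hmem : x ∈ flt := by rw [hflt, List.mem_filter]; exact ⟨hx, hd⟩
                have := List.all_eq_true.mp hchar.2 x hmem
                simp [pvSafe, this]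
              · simp only [Bool.and_eq_true, Bool.not_eq_true', beq_eq_false_iff_ne,
                  ne_eq, not_and_or, not_not] at hd
                rcases hd with hd | hd <;> simp [pvSafe, hd]
            have hany : (c :: rest).any pvAlnumAscii = true := by
              simp only [Bool.and_eq_true, Bool.not_eq_eq_eq_not, Bool.not_true,
                List.isEmpty_eq_false_iff] at hchar
              obtain ⟨x, hx⟩ := List.exists_mem_of_ne_nil _ hchar.1
              rw [List.any_eq_true]
              refine ⟨x, List.mem_of_mem_filter (hflt ▸ hx), ?_⟩
              exact List.all_eq_true.mp hchar.2 x hx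
            have hdanger : (pvDangerousPatterns.any fun p => PySem.Chars.isIn p (c :: rest)) = false := by
              rw [List.any_eq_false]
              intro p hp
              rw [Bool.not_eq_true]
              by_contra hIn
              rw [Bool.not_eq_false] at hIn
              have hsub := ((PySem.Chars.isIn_iff_infix p (c :: rest)).mp hIn).subset
              have bad : ∀ b : Char, b ∈ p → pvSafe b = true := fun b hb =>
                List.all_eq_true.mp hall b (hsub hb)
              simp only [pvDangerousPatterns, List.mem_cons, List.not_mem_nil, or_false] at hp
              rcases hp with h | h | h | h <;> subst h
              · exact absurd (bad '.' (by simp)) (by decide)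
              · exact absurd (bad '/' (by simp)) (by decide)
              · exact absurd (bad '\\' (by simp)) (by decide)
              · exact absurd (bad '~' (by simp)) (by decide)
            simp [hascii, hchar, hdanger, hall, hany]
            omega
          · -- charset fails: B is false too
            have hBfalse : ((c :: rest).all pvSafe && (c :: rest).any pvAlnumAscii) = false := by
              by_contra hB
              rw [Bool.not_eq_false, Bool.and_eq_true] at hB
              apply absurd _ hchar
              rw [Bool.and_eq_true]
              constructor
              · rw [Bool.not_eq_eq_eq_not, Bool.not_true, List.isEmpty_eq_false_iff]
                obtain ⟨x, hx, hxa⟩ := List.any_eq_true.mp hB.2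
                intro hnil
                have hmem : x ∈ flt := by
                  rw [hflt, List.mem_filter]
                  refine ⟨hx, ?_⟩
                  revert hxa
                  simp only [pvAlnumAscii, Bool.or_eq_true, Bool.and_eq_true,
                    decide_eq_true_eq, Bool.not_eq_true', beq_eq_false_iff_ne, ne_eq]
                  intro hax
                  constructor <;> rintro rfl <;> revert hax <;> decide
                rw [hnil] at hmem; exact absurd hmem (List.not_mem_nil)
              · rw [List.all_eq_true]
                intro x hx
                have hxs := List.all_eq_true.mp hB.1 x (List.mem_of_mem_filter (hflt ▸ hx))
                have hd := (List.mem_filter.mp (hflt ▸ hx)).2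
                revert hxs hd
                simp [pvSafe]
                tauto
            rw [Bool.not_eq_true] at hchar
            rw [hBfalse, hchar]
            simp [hascii]
        · -- not ascii: some char is not safe, B is false
          have hBfalse : (c :: rest).all pvSafe = false := by
            rw [List.all_eq_false]
            simp only [pvIsAscii, List.all_eq_true, decide_eq_true_eq, not_forall] at hascii
            obtain ⟨x, hx, hxn⟩ := hascii
            exact ⟨x, hx, fun hs => hxn (pvSafe_ascii hs)⟩
          rw [hBfalse, Bool.false_and]
          simp [hascii]
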